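-- pv_equiv track=rewrite | github.com/xingtaodhu/zhongxing_python | utils.py | labels_sys_sequence
-- ===== SOURCE A (Python) =====
-- def labels_sys_sequence(labels, timestamps):
--     if labels == []:
--         return []
--     m = max(timestamps)
--     n = min(timestamps)
--
--     new_l = []
--     new_l.append(labels[0] + 1)
--     for i in range(1, len(timestamps)):
--         td = int(timestamps[i] - timestamps[i - 1] - 1)
--         while td < -1:
--             td %= 31536000
--         new_l += [0] * max(td, 0)
--         new_l.append(labels[i] + 1)
--     return new_l
-- ===== SOURCE B (Python) =====
-- def labels_sys_sequence(labels, timestamps):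
--     if labels == []:
--         return []
--     n = len(timestamps)
--     # stage 1: normalized padding width before each label (pads[0] == 0)
--     pads = [0]
--     for i in range(1, n):
--         td = timestamps[i] - timestamps[i - 1] - 1
--         if td < -1:
--             td %= 31536000
--         pads.append(max(td, 0))
--     # stage 2: preallocate the zero-filled result and place each label at its
--     # prefix-sum position; the untouched slots are exactly the zero padding
--     out = [0] * (n + sum(pads))
--     pos = 0
--     for i in range(n):
--         pos += pads[i]
--         out[pos] = labels[i] + 1
--         pos += 1
--     return out
-- ===== Notes on version B (the rewrite author's own statement) =====
-- stated objective: alternative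
-- what changed: B replaces A's single append-as-you-go loop by a two-stage algorithm: one pass computes the normalized padding widths, the exact final length is preallocated as a zero-filled list, and a second pass writes each label+1 into its prefix-sum position, leaving the preallocated zeros as padding; Pre_ excludes only the inputs where A raises (nonempty labels with empty timestamps -> ValueError from max, or timestamps longer than labels -> IndexError).
import Mathlib
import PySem

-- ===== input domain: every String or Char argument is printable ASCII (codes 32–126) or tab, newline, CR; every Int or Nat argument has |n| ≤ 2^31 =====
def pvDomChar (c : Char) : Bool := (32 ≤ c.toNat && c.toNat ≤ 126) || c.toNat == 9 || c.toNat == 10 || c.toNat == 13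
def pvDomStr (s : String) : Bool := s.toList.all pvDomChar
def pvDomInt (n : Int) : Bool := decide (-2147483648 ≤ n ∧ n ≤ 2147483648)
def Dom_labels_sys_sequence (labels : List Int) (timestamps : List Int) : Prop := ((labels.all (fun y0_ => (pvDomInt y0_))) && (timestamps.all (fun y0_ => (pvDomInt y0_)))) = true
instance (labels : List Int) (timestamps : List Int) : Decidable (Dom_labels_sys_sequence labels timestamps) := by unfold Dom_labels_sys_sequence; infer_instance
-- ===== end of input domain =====

-- B replaces A's single append-as-you-go loop by a two-stage algorithm: it first
-- computes the normalized padding widths, preallocates a zero-filled result of the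
-- exact final length, and then writes each label into its prefix-sum position,
-- leaving the preallocated zeros as the padding; same cost, different algorithm.
-- ===== PORT A =====
def labels_sys_sequence (labels : List Int) (timestamps : List Int) : List Int :=
  if labels = [] then []
  else
    -- `m = max(timestamps)` / `n = min(timestamps)` are unused bindings; they raise
    -- ValueError on empty timestamps, which Pre_ excludes.
    (PySem.List.pyRange 1 (timestamps.length : Int) 1).foldl
      (fun acc i =>
        -- `while td < -1: td %= 31536000` runs at most once: `%` with this positive
        -- modulus lands in [0, 31536000), where the condition is false — exact as one if.
        let td := PySem.List.pyGetD timestamps i 0 -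
                  PySem.List.pyGetD timestamps (i - 1) 0 - 1
        let td := if td < -1 then PySem.Int.mod td 31536000 else td
        let acc := acc ++ List.replicate (max td 0).toNat 0
        acc ++ [PySem.List.pyGetD labels i 0 + 1])
      [PySem.List.pyGetD labels 0 0 + 1]

-- ===== PORT B =====
def labels_sys_sequence_alt (labels : List Int) (timestamps : List Int) : List Int :=
  if labels = [] then []
  else
    let n := (timestamps.length : Int)
    -- stage 1: normalized padding width before each label (pads[0] == 0);
    -- `if td < -1: td %= 31536000` as in Source B (the while of A runs at most once).
    let pads := (PySem.List.pyRange 1 n 1).foldl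
      (fun pads i =>
        let td := PySem.List.pyGetD timestamps i 0 -
                  PySem.List.pyGetD timestamps (i - 1) 0 - 1
        let td := if td < -1 then PySem.Int.mod td 31536000 else td
        pads ++ [max td 0]) [(0 : Int)]
    -- stage 2: preallocate and place; `out[pos] = labels[i] + 1` is in range by
    -- construction, pySetD is exact there.
    let out := List.replicate (n + pads.sum).toNat (0 : Int)
    ((PySem.List.pyRange 0 n 1).foldl
      (fun (st : List Int × Int) i =>
        let pos := st.2 + PySem.List.pyGetD pads i 0
        (PySem.List.pySetD st.1 pos (PySem.List.pyGetD labels i 0 + 1), pos + 1))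
      (out, 0)).1

-- ===== PRECONDITION & SPEC =====
-- Pre_ excludes exactly the inputs where A raises: with nonempty labels, empty
-- timestamps (ValueError from max) or timestamps longer than labels (IndexError).
def Pre_labels_sys_sequence (labels : List Int) (timestamps : List Int) : Prop :=
  labels = [] ∨ (timestamps ≠ [] ∧ timestamps.length ≤ labels.length)
instance (labels : List Int) (timestamps : List Int) : Decidable (Pre_labels_sys_sequence labels timestamps) := by unfold Pre_labels_sys_sequence; infer_instance
def pvWitness_labels_sys_sequence : List Int × List Int := ([3, 4, 5], [10, 12, 20])

def Spec_labels_sys_sequence (labels : List Int) (timestamps : List Int) (out : List Int) : Prop := out = labels_sys_sequence_alt labels timestamps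
instance (labels : List Int) (timestamps : List Int) (out : List Int) : Decidable (Spec_labels_sys_sequence labels timestamps out) := by unfold Spec_labels_sys_sequence; infer_instance

-- ===== CLAIM (what is proved, stated in full; the proofs are below) =====
def Claim_equal_labels_sys_sequence : Prop := ∀ (labels : List Int) (timestamps : List Int), Dom_labels_sys_sequence labels timestamps → Pre_labels_sys_sequence labels timestamps → Spec_labels_sys_sequence labels timestamps (labels_sys_sequence labels timestamps)

-- ===== LEMMAS AND PROOFS =====
-- the normalized padding width before label i (i ≥ 1)
def pvPad (timestamps : List Int) (i : Int) : Int :=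
  let td := PySem.List.pyGetD timestamps i 0 - PySem.List.pyGetD timestamps (i - 1) 0 - 1
  max (if td < -1 then PySem.Int.mod td 31536000 else td) 0

-- A as a flatten of per-gap segments
lemma pvA_eq (labels timestamps : List Int) (hl : labels ≠ []) :
    labels_sys_sequence labels timestamps =
      [PySem.List.pyGetD labels 0 0 + 1] ++
        (PySem.List.pyRange 1 (timestamps.length : Int) 1).flatMap
          (fun i => List.replicate (pvPad timestamps i).toNat 0 ++
                    [PySem.List.pyGetD labels i 0 + 1]) := by
  unfold labels_sys_sequence
  rw [if_neg hl]
  have hfold :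
      (fun (acc : List Int) (i : Int) =>
        let td := PySem.List.pyGetD timestamps i 0 -
                  PySem.List.pyGetD timestamps (i - 1) 0 - 1
        let td := if td < -1 then PySem.Int.mod td 31536000 else td
        let acc := acc ++ List.replicate (max td 0).toNat 0
        acc ++ [PySem.List.pyGetD labels i 0 + 1]) =
      (fun (acc : List Int) (i : Int) => acc ++
        (List.replicate (pvPad timestamps i).toNat 0 ++
         [PySem.List.pyGetD labels i 0 + 1])) := by
    funext acc i
    simp [pvPad, List.append_assoc]
  rw [hfold, PySem.List.foldl_append_eq_flatMap]

-- stage 1 of B: the pads list in closed form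
lemma pvPads_eq (timestamps : List Int) :
    (PySem.List.pyRange 1 (timestamps.length : Int) 1).foldl
      (fun pads i =>
        let td := PySem.List.pyGetD timestamps i 0 -
                  PySem.List.pyGetD timestamps (i - 1) 0 - 1
        let td := if td < -1 then PySem.Int.mod td 31536000 else td
        pads ++ [max td 0]) [(0 : Int)]
    = (0 : Int) :: (PySem.List.pyRange 1 (timestamps.length : Int) 1).map (pvPad timestamps) := by
  have hfold :
      (fun (pads : List Int) (i : Int) =>
        let td := PySem.List.pyGetD timestamps i 0 -
                  PySem.List.pyGetD timestamps (i - 1) 0 - 1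
        let td := if td < -1 then PySem.Int.mod td 31536000 else td
        pads ++ [max td 0]) =
      (fun (pads : List Int) (i : Int) => pads ++ [pvPad timestamps i]) := by
    funext pads i
    simp [pvPad]
  rw [hfold, PySem.List.foldl_append_singleton_eq_map]
  simp

-- splitting a zero block around the written position
lemma pvRepSplit (a m : Nat) :
    List.replicate (a + 1 + m) (0 : Int)
      = List.replicate a 0 ++ (0 : Int) :: List.replicate m 0 := by
  rw [show a + 1 + m = a + (m + 1) by omega, List.replicate_add, List.replicate_succ]

-- generic scatter: writing values at prefix-sum positions of a zero-filled list
-- produces exactly the flatten of zero-padded singleton segments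
lemma pvScatter (ps : List (Int × Int)) (pre : List Int)
    (hps : ∀ p ∈ ps, 0 ≤ p.1) :
    (ps.foldl
      (fun (st : List Int × Int) p =>
        (PySem.List.pySetD st.1 (st.2 + p.1) (p.2 + 1), st.2 + p.1 + 1))
      (pre ++ List.replicate ((ps.map (fun p => p.1.toNat + 1)).sum) 0,
       (pre.length : Int))).1
    = pre ++ ps.flatMap (fun p => List.replicate p.1.toNat 0 ++ [p.2 + 1]) := by
  induction ps generalizing pre with
  | nil => simp
  | cons p ps ih =>
    have hp : 0 ≤ p.1 := hps p (by simp)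
    have hrest : ∀ q ∈ ps, 0 ≤ q.1 := fun q hq => hps q (by simp [hq])
    simp only [List.foldl_cons, List.map_cons, List.sum_cons, List.flatMap_cons]
    have hpos : (0 : Int) ≤ (pre.length : Int) + p.1 := by positivity
    have hset : PySem.List.pySetD
        (pre ++ List.replicate (p.1.toNat + 1 + (ps.map (fun q => q.1.toNat + 1)).sum) (0 : Int))
        ((pre.length : Int) + p.1) (p.2 + 1)
        = (pre ++ List.replicate p.1.toNat 0 ++ [p.2 + 1]) ++
          List.replicate ((ps.map (fun q => q.1.toNat + 1)).sum) 0 := by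
      rw [PySem.List.pySetD_of_nonneg _ _ hpos, pvRepSplit]
      have htn : ((pre.length : Int) + p.1).toNat = pre.length + p.1.toNat := by omega
      rw [htn, List.set_append_right _ _ (by omega),
          show pre.length + p.1.toNat - pre.length = p.1.toNat by omega,
          List.set_append_right _ _ (by simp)]
      simp [List.append_assoc]
    have hlen : (pre.length : Int) + p.1 + 1
        = (((pre ++ List.replicate p.1.toNat 0 ++ [p.2 + 1]).length : Nat) : Int) := by
      simp; omega
    rw [hset, hlen, ih _ hrest]
    simp [List.append_assoc]

-- length+sum in Nat form, for nonnegative pads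
lemma pvTotal (pads : List Int) (h : ∀ x ∈ pads, 0 ≤ x) :
    ((pads.length : Int) + pads.sum).toNat = (pads.map (fun x => x.toNat + 1)).sum := by
  induction pads with
  | nil => simp
  | cons x t ih =>
    have hx : 0 ≤ x := h x (by simp)
    have ht : ∀ y ∈ t, 0 ≤ y := fun y hy => h y (by simp [hy])
    have hts : 0 ≤ t.sum := List.sum_nonneg ht
    simp only [List.length_cons, List.sum_cons, List.map_cons]
    rw [← ih ht]
    push_cast
    omega

lemma pv_core (labels timestamps : List Int) (hl : labels ≠ []) (hts : timestamps ≠ [])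
    (hlen : timestamps.length ≤ labels.length) :
    labels_sys_sequence labels timestamps = labels_sys_sequence_alt labels timestamps := by
  unfold labels_sys_sequence_alt
  rw [if_neg hl]
  simp only []
  rw [pvPads_eq timestamps]
  set n := timestamps.length with hn
  set pads : List Int := (0 : Int) :: (PySem.List.pyRange 1 (n : Int) 1).map (pvPad timestamps) with hpads
  have hpadlen : pads.length = n := by
    have hpos : 0 < n := List.length_pos_of_ne_nil hts
    simp [hpads, PySem.List.length_pyRange_one]
    omega
  have hpadnn : ∀ x ∈ pads, 0 ≤ x := by
    intro x hx
    rcases List.mem_cons.1 hx with h | h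
    · omega
    · rcases List.mem_map.1 h with ⟨i, _, rfl⟩
      simp [pvPad]
  -- the indexed fold over range 0 n is the fold over pads.zip labels
  have hmap : (PySem.List.pyRange 0 (n : Int) 1).map
      (fun i => (PySem.List.pyGetD pads i 0, PySem.List.pyGetD labels i 0))
      = pads.zip labels := by
    apply List.ext_getElem
    · simp [PySem.List.length_pyRange_one, hpadlen]; omega
    · intro k h1 h2
      simp only [List.getElem_map, PySem.List.getElem_pyRange_one, List.getElem_zip]
      have e : (0 : Int) + (k : Int) = ((k : Nat) : Int) := by omega
      rw [e, PySem.List.pyGetD_natCast, PySem.List.pyGetD_natCast]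
      have hk : k < n := by
        simp [PySem.List.length_pyRange_one] at h1; omega
      rw [List.getD_eq_getElem _ _ (by omega), List.getD_eq_getElem _ _ (by omega)]
  have hfold2 : (PySem.List.pyRange 0 (n : Int) 1).foldl
      (fun (st : List Int × Int) i =>
        (PySem.List.pySetD st.1 (st.2 + PySem.List.pyGetD pads i 0)
           (PySem.List.pyGetD labels i 0 + 1),
         st.2 + PySem.List.pyGetD pads i 0 + 1))
      (List.replicate ((n : Int) + pads.sum).toNat (0 : Int), 0)
      = (pads.zip labels).foldl
      (fun (st : List Int × Int) p =>
        (PySem.List.pySetD st.1 (st.2 + p.1) (p.2 + 1), st.2 + p.1 + 1))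
      (List.replicate ((n : Int) + pads.sum).toNat (0 : Int), 0) := by
    rw [← hmap, List.foldl_map]
  rw [hfold2]
  have hzipnn : ∀ p ∈ pads.zip labels, 0 ≤ p.1 := by
    intro p hp
    obtain ⟨a, b⟩ := p
    exact hpadnn a (List.of_mem_zip hp).1
  have hfst : (pads.zip labels).map Prod.fst = pads :=
    List.map_fst_zip (by omega)
  have htot : ((n : Int) + pads.sum).toNat
      = ((pads.zip labels).map (fun p => p.1.toNat + 1)).sum := by
    have : (pads.zip labels).map (fun p => p.1.toNat + 1)
        = pads.map (fun x => x.toNat + 1) := by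
      rw [show (fun (p : Int × Int) => p.1.toNat + 1) = (fun x : Int => x.toNat + 1) ∘ (·.1) from rfl,
          ← List.map_map, hfst]
    rw [this, ← hpadlen, pvTotal pads hpadnn]
  rw [htot]
  have := pvScatter (pads.zip labels) [] hzipnn
  simp only [List.nil_append, List.length_nil, Nat.cast_zero] at this
  rw [this]
  -- finally, compare with A's flatten form
  rw [pvA_eq labels timestamps hl]
  obtain ⟨l0, lrest, rfl⟩ : ∃ a t, labels = a :: t := by
    cases labels with
    | nil => exact absurd rfl hl
    | cons a t => exact ⟨a, t, rfl⟩
  simp only [hpads, List.zip_cons_cons, List.flatMap_cons]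
  have hz : ((PySem.List.pyRange 1 (n : Int) 1).map (pvPad timestamps)).zip lrest
      = (PySem.List.pyRange 1 (n : Int) 1).map
          (fun i => (pvPad timestamps i, PySem.List.pyGetD (l0 :: lrest) i 0)) := by
    apply List.ext_getElem
    · simp only [List.length_zip, List.length_map, PySem.List.length_pyRange_one]
      simp only [List.length_cons] at hlen
      omega
    · intro k h1 h2
      simp only [List.getElem_zip, List.getElem_map, PySem.List.getElem_pyRange_one]
      have hk : k < n - 1 := by
        simp [PySem.List.length_pyRange_one] at h2; omega
      have hlr : n ≤ lrest.length + 1 := by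
        simpa using hlen
      have e : (1 : Int) + (k : Int) = ((k + 1 : Nat) : Int) := by omega
      rw [e, PySem.List.pyGetD_natCast]
      rw [List.getD_eq_getElem _ _ (by simp only [List.length_cons]; omega)]
      simp
  rw [hz, List.flatMap_map]
  simp only [PySem.List.pyGetD_zero]
  rfl

-- ===== VERDICT (by name: the statement is the Claim_ definition above) =====
theorem labels_sys_sequence_spec : Claim_equal_labels_sys_sequence := by
  intro labels timestamps _ hpre
  unfold Spec_labels_sys_sequence
  rcases hpre with h | ⟨hts, hlen⟩
  · subst h; rfl
  · by_cases hl : labels = []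
    · subst hl; rfl
    · exact pv_core labels timestamps hl hts hlen
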